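-- pv_equiv track=rewrite | github.com/ClangBuiltLinux/IWYUScripts | lib/remove_quotes.py | replace_quotes_with_angle_brackets
-- ===== SOURCE A (Python) =====
-- def replace_quotes_with_angle_brackets(text):
--     """Replaces odd " with < and even " with >"""
--     replace_with = "<"
--     text = text.split("\n")
--     formatted = []
--     for line in text:
--         if "/" in line and ".." not in line:
--             result = []
--             for char in line:
--                 if char == '"':
--                     result.append(replace_with)
--                     replace_with = ">" if replace_with == "<" else "<"
--                 else:
--                     result.append(char)
--             formatted.append("".join(result))
--         else:
--             formatted.append(line)
--     return "\n".join(formatted)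
-- ===== SOURCE B (Python) =====
-- def replace_quotes_with_angle_brackets(text):
--     """Replaces odd " with < and even " with >"""
--     count = 0
--     out = []
--     for line in text.split("\n"):
--         if "/" in line and ".." not in line:
--             segs = line.split('"')
--             parts = [segs[0]]
--             for seg in segs[1:]:
--                 parts.append("<" if count % 2 == 0 else ">")
--                 count += 1
--                 parts.append(seg)
--             out.append("".join(parts))
--         else:
--             out.append(line)
--     return "\n".join(out)
-- ===== Notes on version B (the rewrite author's own statement) =====
-- stated objective: alternative
-- what changed: Instead of scanning each qualifying line character by character with a toggling replacement string, B splits the line on the double-quote character and rejoins the segments with brackets chosen by the parity of a single integer counter threaded across all lines.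
import Mathlib
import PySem

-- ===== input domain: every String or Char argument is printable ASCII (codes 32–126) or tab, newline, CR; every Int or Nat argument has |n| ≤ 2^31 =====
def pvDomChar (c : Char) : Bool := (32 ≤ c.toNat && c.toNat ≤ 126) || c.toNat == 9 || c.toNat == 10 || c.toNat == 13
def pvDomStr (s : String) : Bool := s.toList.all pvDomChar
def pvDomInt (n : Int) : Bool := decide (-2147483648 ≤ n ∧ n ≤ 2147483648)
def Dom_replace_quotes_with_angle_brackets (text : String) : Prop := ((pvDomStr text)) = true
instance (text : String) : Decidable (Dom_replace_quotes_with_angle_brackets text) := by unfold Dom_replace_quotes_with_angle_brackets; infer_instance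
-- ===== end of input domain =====

-- B replaces A's per-character scan with a toggling state by split-on-'"'/rejoin with a
-- parity counter threaded across lines (objective: alternative decomposition, same cost).

-- ===== PORT A =====
-- the inner character loop of A (replace_with as a Char, '"' -> current bracket, toggle)
def rqStepA (st : Char × List Char) (c : Char) : Char × List Char :=
  if c = '"' then (if st.1 = '<' then '>' else '<', st.2 ++ [st.1])
  else (st.1, st.2 ++ [c])

-- one line of A's outer loop: state = (replace_with, formatted so far)
def rqLineA (st : Char × List (List Char)) (line : List Char) : Char × List (List Char) :=
  if PySem.Chars.isIn ['/'] line && !PySem.Chars.isIn ['.', '.'] line then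
    let r := line.foldl rqStepA (st.1, [])
    (r.1, st.2 ++ [r.2])
  else (st.1, st.2 ++ [line])

def replace_quotes_with_angle_brackets (text : String) : String :=
  let lines := PySem.Chars.splitOn text.toList ['\n']
  let r := lines.foldl rqLineA ('<', [])
  String.ofList (PySem.Chars.join ['\n'] r.2)

-- ===== PORT B =====
-- bracket chosen by the counter's parity
def rqBracket (k : Nat) : Char := if k % 2 = 0 then '<' else '>'

-- B's inner loop over segs[1:]: append bracket (by parity), bump counter, append segment
def rqJoinB (k : Nat) : List (List Char) → List Char × Nat
  | [] => ([], k)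
  | s :: rest =>
    let r := rqJoinB (k + 1) rest
    (rqBracket k :: (s ++ r.1), r.2)

-- one line of B's loop: state = (counter, output so far); line.split('"') = List.splitOn
def rqLineB (st : Nat × List (List Char)) (line : List Char) : Nat × List (List Char) :=
  if PySem.Chars.isIn ['/'] line && !PySem.Chars.isIn ['.', '.'] line then
    match line.splitOn '"' with
    | [] => (st.1, st.2 ++ [[]])   -- unreachable: splitOn never returns []
    | h :: t =>
      let r := rqJoinB st.1 t
      (r.2, st.2 ++ [h ++ r.1])
  else (st.1, st.2 ++ [line])

def replace_quotes_with_angle_brackets_alt (text : String) : String :=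
  let lines := PySem.Chars.splitOn text.toList ['\n']
  let r := lines.foldl rqLineB (0, [])
  String.ofList (PySem.Chars.join ['\n'] r.2)

-- ===== PRECONDITION & SPEC =====
def Spec_replace_quotes_with_angle_brackets (text : String) (out : String) : Prop := out = replace_quotes_with_angle_brackets_alt text
instance (text : String) (out : String) : Decidable (Spec_replace_quotes_with_angle_brackets text out) := by unfold Spec_replace_quotes_with_angle_brackets; infer_instance

-- ===== CLAIM (what is proved, stated in full; the proofs are below) =====
def Claim_equal_replace_quotes_with_angle_brackets : Prop := ∀ (text : String), Dom_replace_quotes_with_angle_brackets text → Spec_replace_quotes_with_angle_brackets text (replace_quotes_with_angle_brackets text)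

-- ===== LEMMAS AND PROOFS =====

-- the common value both programs compute on a qualifying line: each '"' becomes the
-- bracket of the running parity, which advances on every quote
def rqMapQuote (k : Nat) : List Char → List Char
  | [] => []
  | c :: cs => if c = '"' then rqBracket k :: rqMapQuote (k + 1) cs else c :: rqMapQuote k cs

theorem rqBracket_toggle (k : Nat) :
    (if rqBracket k = '<' then '>' else '<') = rqBracket (k + 1) := by
  rcases Nat.mod_two_eq_zero_or_one k with h | h <;>
    simp [rqBracket, h, Nat.add_mod]

theorem rqInnerA (line : List Char) : ∀ (k : Nat) (acc : List Char),
    line.foldl rqStepA (rqBracket k, acc) =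
      (rqBracket (k + line.count '"'), acc ++ rqMapQuote k line) := by
  induction line with
  | nil => intro k acc; simp [rqMapQuote]
  | cons c cs ih =>
    intro k acc
    rw [List.foldl_cons]
    by_cases hc : c = '"'
    · subst hc
      have hstep : rqStepA (rqBracket k, acc) '"' = (rqBracket (k + 1), acc ++ [rqBracket k]) := by
        simp [rqStepA, rqBracket_toggle]
      have hk : k + 1 + List.count '"' cs = k + (List.count '"' cs + 1) := by omega
      rw [hstep, ih (k + 1)]
      simp [rqMapQuote, hk]
    · have hstep : rqStepA (rqBracket k, acc) c = (rqBracket k, acc ++ [c]) := by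
        simp [rqStepA, hc]
      rw [hstep, ih k]
      simp [rqMapQuote, hc]

theorem rqSplitChar (line : List Char) : ∀ (k : Nat) (h : List Char) (t : List (List Char)),
    line.splitOn '"' = h :: t →
      h ++ (rqJoinB k t).1 = rqMapQuote k line ∧ (rqJoinB k t).2 = k + line.count '"' := by
  induction line with
  | nil =>
    intro k h t hs
    simp [List.splitOn, List.splitOnP_nil] at hs
    obtain ⟨rfl, rfl⟩ := hs
    simp [rqJoinB, rqMapQuote]
  | cons c cs ih =>
    intro k h t hs
    rw [List.splitOn, List.splitOnP_cons] at hs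
    by_cases hc : c = '"'
    · subst hc
      simp only [beq_self_eq_true, if_pos] at hs
      injection hs with h1 h2
      subst h1; subst h2
      rcases e : cs.splitOnP (· == '"') with _ | ⟨h', t'⟩
      · exact absurd e (List.splitOnP_ne_nil _ cs)
      obtain ⟨ih1, ih2⟩ := ih (k + 1) h' t' e
      refine ⟨?_, ?_⟩
      · simp [rqJoinB, rqMapQuote, ← ih1]
      · simp only [rqJoinB, ih2, List.count_cons, beq_self_eq_true, if_pos]
        omega
    · simp only [beq_iff_eq, if_neg hc] at hs
      rcases e : cs.splitOnP (· == '"') with _ | ⟨h', t'⟩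
      · exact absurd e (List.splitOnP_ne_nil _ cs)
      rw [e, List.modifyHead] at hs
      injection hs with h1 h2
      subst h1; subst h2
      obtain ⟨ih1, ih2⟩ := ih k h' t' e
      refine ⟨?_, ?_⟩
      · simp [rqMapQuote, hc, ← ih1]
      · simp [ih2, hc]

theorem rqOuter (lines : List (List Char)) : ∀ (k : Nat) (acc : List (List Char)),
    lines.foldl rqLineA (rqBracket k, acc) =
      (rqBracket (lines.foldl rqLineB (k, acc)).1, (lines.foldl rqLineB (k, acc)).2) := by
  induction lines with
  | nil => intro k acc; simp
  | cons line rest ih =>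
    intro k acc
    simp only [List.foldl_cons]
    by_cases hq : (PySem.Chars.isIn ['/'] line && !PySem.Chars.isIn ['.', '.'] line) = true
    · obtain ⟨h, t, ht⟩ : ∃ h t, line.splitOn '"' = h :: t := by
        rcases e : line.splitOn '"' with _ | ⟨h, t⟩
        · exact absurd e (List.splitOnP_ne_nil _ line)
        · exact ⟨h, t, rfl⟩
      obtain ⟨hj1, hj2⟩ := rqSplitChar line k h t ht
      have hA : rqLineA (rqBracket k, acc) line =
          (rqBracket (k + line.count '"'), acc ++ [rqMapQuote k line]) := by
        simp [rqLineA, hq, rqInnerA line k []]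
      have hB : rqLineB (k, acc) line = (k + line.count '"', acc ++ [rqMapQuote k line]) := by
        simp [rqLineB, hq, ht, hj2, hj1]
      rw [hA, hB, ih]
    · have hA : rqLineA (rqBracket k, acc) line = (rqBracket k, acc ++ [line]) := by
        simp [rqLineA, hq]
      have hB : rqLineB (k, acc) line = (k, acc ++ [line]) := by
        simp [rqLineB, hq]
      rw [hA, hB, ih]

-- ===== VERDICT (by name: the statement is the Claim_ definition above) =====
theorem replace_quotes_with_angle_brackets_spec : Claim_equal_replace_quotes_with_angle_brackets := by
  intro text _
  show replace_quotes_with_angle_brackets text = _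
  simp only [replace_quotes_with_angle_brackets, replace_quotes_with_angle_brackets_alt]
  rw [show ('<' : Char) = rqBracket 0 by decide, rqOuter]
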